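-- pv_equiv track=rewrite | github.com/superwojciech/python-2023 | src/algo/z12/sol_A.py | get_min_number_of_operations
-- ===== SOURCE A (Python) =====
-- def get_min_number_of_operations(a: list[int]) -> int:
--     x = 0
--     y = 0
--     length = len(a)
--     while length > y:
--         if a[y] < 0:
--             x = x +1
--             while a[y] <= 0:
--                    y = y+1
--                    if length == y: break
--         y = y +1
--     return x
-- ===== SOURCE B (Python) =====
-- from itertools import groupby
--
-- def get_min_number_of_operations(a: list[int]) -> int:
--     count = 0
--     for key, grp in groupby(a, key=lambda v: v > 0):
--         if not key and any(v < 0 for v in grp):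
--             count += 1
--     return count
-- ===== Notes on version B (the rewrite author's own statement) =====
-- stated objective: simpler
-- what changed: A's index-based two-pointer scan with a nested inner while that consumes each nonpositive run is replaced by grouping the list into maximal (>0)/(<=0) runs via itertools.groupby and counting the groups that contain a negative.
import Mathlib
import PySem

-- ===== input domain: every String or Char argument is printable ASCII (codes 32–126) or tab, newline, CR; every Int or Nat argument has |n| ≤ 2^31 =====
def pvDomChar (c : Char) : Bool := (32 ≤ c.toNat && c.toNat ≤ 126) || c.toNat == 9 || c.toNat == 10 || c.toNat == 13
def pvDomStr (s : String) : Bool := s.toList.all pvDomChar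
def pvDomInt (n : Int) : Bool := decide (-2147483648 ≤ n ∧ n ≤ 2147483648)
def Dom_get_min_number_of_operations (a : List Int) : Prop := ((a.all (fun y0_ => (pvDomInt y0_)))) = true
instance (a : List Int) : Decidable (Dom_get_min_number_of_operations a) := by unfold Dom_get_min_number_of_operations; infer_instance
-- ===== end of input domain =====

-- B replaces A's index-based two-pointer scan (inner while consuming each run) by grouping the
-- list into maximal (>0)/(≤0) runs and counting the runs that contain a negative; objective: simpler.

-- ===== PORT A =====
-- inner 'while a[y] <= 0: y += 1; if length == y: break'; fuel only makes the loop total,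
-- it is always ≥ the number of iterations at the call site
def pvInnerA (a : List Int) (length : Int) : Int → Nat → Int
  | y, 0 => y
  | y, fuel+1 =>
    if (PySem.List.pyGet? a y).getD 0 ≤ 0 then
      let y' := y + 1
      if length == y' then y' else pvInnerA a length y' fuel
    else y

-- outer 'while length > y' loop carrying (x, y); fuel a.length + 1 covers every iteration
def pvOuterA (a : List Int) (length : Int) : Int → Int → Nat → Int
  | x, _, 0 => x
  | x, y, fuel+1 =>
    if length > y then
      if (PySem.List.pyGet? a y).getD 0 < 0 then
        pvOuterA a length (x + 1) (pvInnerA a length y ((length - y).toNat + 1) + 1) fuel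
      else pvOuterA a length x (y + 1) fuel
    else x

def get_min_number_of_operations (a : List Int) : Int :=
  pvOuterA a (a.length : Int) 0 0 (a.length + 1)

-- ===== PORT B =====
-- itertools.groupby(a, key=lambda v: v > 0): maximal runs with their key
def pvGroups : List Int → List (Bool × List Int)
  | [] => []
  | v :: rest =>
    match pvGroups rest with
    | [] => [(decide (v > 0), [v])]
    | (k, g) :: gs =>
      if decide (v > 0) = k then (k, v :: g) :: gs
      else (decide (v > 0), [v]) :: (k, g) :: gs

def get_min_number_of_operations_alt (a : List Int) : Int :=
  (pvGroups a).foldl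
    (fun count kg => if !kg.1 && kg.2.any (fun v => decide (v < 0)) then count + 1 else count) 0

-- ===== PRECONDITION & SPEC =====
def Spec_get_min_number_of_operations (a : List Int) (out : Int) : Prop := out = get_min_number_of_operations_alt a
instance (a : List Int) (out : Int) : Decidable (Spec_get_min_number_of_operations a out) := by unfold Spec_get_min_number_of_operations; infer_instance

-- ===== CLAIM (what is proved, stated in full; the proofs are below) =====
def Claim_equal_get_min_number_of_operations : Prop := ∀ (a : List Int), Dom_get_min_number_of_operations a → Spec_get_min_number_of_operations a (get_min_number_of_operations a)

-- ===== LEMMAS AND PROOFS =====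

-- reference count: one pass, inRun = "inside a ≤0-run whose negative was already counted"
def pvCnt : List Int → Bool → Int
  | [], _ => 0
  | v :: r, inRun =>
    if v > 0 then pvCnt r false
    else if v < 0 then (if inRun then 0 else 1) + pvCnt r true
    else pvCnt r inRun

def pvPred (kg : Bool × List Int) : Bool := !kg.1 && kg.2.any (fun v => decide (v < 0))

def pvGCount (gs : List (Bool × List Int)) : Int := ((gs.filter pvPred).length : Int)

-- like pvGCount but with a leading key-false group treated as already counted
def pvGCount' : List (Bool × List Int) → Int
  | (false, _) :: gs => pvGCount gs
  | gs => pvGCount gs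

theorem pvFoldl_count (gs : List (Bool × List Int)) (c : Int) :
    gs.foldl (fun count kg => if !kg.1 && kg.2.any (fun v => decide (v < 0)) then count + 1 else count) c
      = c + pvGCount gs := by
  induction gs generalizing c with
  | nil => simp [pvGCount]
  | cons kg gs ih =>
    simp only [List.foldl_cons, ih, pvGCount, List.filter_cons, pvPred]
    split <;> simp <;> omega

theorem pvGroups_eq_nil {l : List Int} (h : pvGroups l = []) : l = [] := by
  cases l with
  | nil => rfl
  | cons v r =>
    exfalso
    unfold pvGroups at h
    cases hg : pvGroups r with
    | nil => simp [hg] at h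
    | cons kg gs => obtain ⟨k, g⟩ := kg; simp [hg] at h; split at h <;> simp at h

theorem pvGCount_cons (k : Bool) (g : List Int) (gs : List (Bool × List Int)) :
    pvGCount ((k, g) :: gs) = (if pvPred (k, g) = true then 1 else 0) + pvGCount gs := by
  simp only [pvGCount, List.filter_cons]
  split <;> simp <;> omega

theorem pvPred_true (g : List Int) : pvPred (true, g) = false := rfl

theorem pvPred_false (g : List Int) :
    pvPred (false, g) = g.any (fun v => decide (v < 0)) := rfl

theorem pvGroups_cnt (l : List Int) :
    pvGCount (pvGroups l) = pvCnt l false ∧ pvGCount' (pvGroups l) = pvCnt l true := by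
  induction l with
  | nil => simp [pvGroups, pvGCount, pvGCount', pvCnt]
  | cons v r ih =>
    obtain ⟨ih1, ih2⟩ := ih
    cases hg : pvGroups r with
    | nil =>
      have hr : r = [] := pvGroups_eq_nil hg
      subst hr
      simp only [pvGroups, pvCnt]
      rcases lt_trichotomy v 0 with hv | hv | hv
      · simp [pvGCount, pvGCount', pvPred, List.filter, hv, show ¬ v > 0 by omega]
      · subst hv
        simp [pvGCount, pvGCount', pvPred, List.filter]
      · simp [pvGCount, pvGCount', pvPred, List.filter, hv,
          show ¬ v < 0 by omega]
    | cons kg gs =>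
      obtain ⟨k, g⟩ := kg
      rw [hg] at ih1 ih2
      cases k with
      | false =>
        rw [pvGCount_cons, pvPred_false] at ih1
        have hB : pvGCount gs = pvCnt r true := ih2
        simp only [pvGroups, hg]
        rcases lt_trichotomy v 0 with hv | hv | hv
        · -- v < 0, new element joins the key-false group
          rw [if_pos (by simp; omega)]
          refine ⟨?_, ?_⟩
          · rw [pvGCount_cons, pvPred_false]
            simp only [pvCnt, if_neg (show ¬ v > 0 by omega), if_pos hv, List.any_cons,
              if_neg (Bool.false_ne_true)]
            simp [hv, hB]
          · show pvGCount gs = pvCnt (v :: r) true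
            simp [pvCnt, show ¬ v > 0 by omega, hv, hB]
        · -- v = 0 joins the key-false group, changes nothing
          subst hv
          rw [if_pos (by simp)]
          refine ⟨?_, ?_⟩
          · rw [pvGCount_cons, pvPred_false]
            simp only [pvCnt, if_neg (show ¬ (0:Int) > 0 by omega),
              if_neg (show ¬ (0:Int) < 0 by omega), List.any_cons]
            simpa using ih1
          · show pvGCount gs = pvCnt ((0:Int) :: r) true
            simp [pvCnt, hB]
        · -- v > 0 opens a new key-true group
          rw [if_neg (by simp; omega)]
          simp only [show decide (v > 0) = true from by simp [hv]]
          refine ⟨?_, ?_⟩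
          · rw [pvGCount_cons, pvPred_true]
            simp only [pvCnt, if_pos hv, if_neg (Bool.false_ne_true)]
            rw [pvGCount_cons, pvPred_false]
            simpa using ih1
          · show pvGCount ((true, [v]) :: (false, g) :: gs) = pvCnt (v :: r) true
            rw [pvGCount_cons, pvPred_true, pvGCount_cons, pvPred_false]
            simp only [pvCnt, if_pos hv, if_neg (Bool.false_ne_true)]
            simpa using ih1
      | true =>
        have hA : pvGCount gs = pvCnt r false := by
          rw [pvGCount_cons, pvPred_true] at ih1
          simpa using ih1
        have hB : pvGCount gs = pvCnt r true := by
          have : pvGCount' ((true, g) :: gs) = pvGCount ((true, g) :: gs) := rfl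
          rw [this, pvGCount_cons, pvPred_true] at ih2
          simpa using ih2
        simp only [pvGroups, hg]
        rcases lt_trichotomy v 0 with hv | hv | hv
        · -- v < 0 opens a new key-false group
          rw [if_neg (by simp; omega)]
          simp only [show decide (v > 0) = false from by simp; omega]
          refine ⟨?_, ?_⟩
          · rw [pvGCount_cons, pvPred_false, pvGCount_cons, pvPred_true]
            simp only [pvCnt, if_neg (show ¬ v > 0 by omega), if_pos hv,
              if_neg (Bool.false_ne_true)]
            simp [hv, hB]
          · show pvGCount ((true, g) :: gs) = pvCnt (v :: r) true
            rw [pvGCount_cons, pvPred_true]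
            simp [pvCnt, show ¬ v > 0 by omega, hv, hB]
        · -- v = 0 opens a new key-false group with no negative
          subst hv
          rw [if_neg (by simp)]
          simp only [show decide ((0:Int) > 0) = false from by simp]
          refine ⟨?_, ?_⟩
          · rw [pvGCount_cons, pvPred_false, pvGCount_cons, pvPred_true]
            simp [pvCnt, hA]
          · show pvGCount ((true, g) :: gs) = pvCnt ((0:Int) :: r) true
            rw [pvGCount_cons, pvPred_true]
            simp [pvCnt, hB]
        · -- v > 0 joins the key-true group
          rw [if_pos (by simp; omega)]
          refine ⟨?_, ?_⟩
          · rw [pvGCount_cons, pvPred_true]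
            simp [pvCnt, hv, show ¬ v < 0 by omega, hA]
          · show pvGCount ((true, v :: g) :: gs) = pvCnt (v :: r) true
            rw [pvGCount_cons, pvPred_true]
            simp [pvCnt, hv, show ¬ v < 0 by omega, hA]

-- length of the leading ≤0 run
def pvTW (l : List Int) : Nat := (l.takeWhile (fun v => decide (v ≤ 0))).length

theorem pvCnt_true_drop (l : List Int) :
    pvCnt l true = pvCnt (l.drop (pvTW l + 1)) false := by
  induction l with
  | nil => simp [pvCnt]
  | cons v r ih =>
    by_cases hv : v ≤ 0
    · have ht : pvTW (v :: r) = pvTW r + 1 := by simp [pvTW, List.takeWhile_cons, hv]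
      have hd : (v :: r).drop (pvTW (v :: r) + 1) = r.drop (pvTW r + 1) := by
        rw [ht]; rfl
      rw [hd]
      rcases lt_or_eq_of_le hv with hv' | hv'
      · simp [pvCnt, show ¬ v > 0 by omega, hv', ih]
      · subst hv'; simp [pvCnt, ih]
    · have ht : pvTW (v :: r) = 0 := by simp [pvTW, List.takeWhile_cons, hv]
      rw [ht]
      simp [pvCnt, show v > 0 by omega]

theorem pvTW_cons_le {v : Int} (r : List Int) (hv : v ≤ 0) :
    pvTW (v :: r) = pvTW r + 1 := by
  unfold pvTW
  rw [List.takeWhile_cons, if_pos (by simpa using hv), List.length_cons]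

theorem pvTW_cons_pos {v : Int} (r : List Int) (hv : ¬ v ≤ 0) :
    pvTW (v :: r) = 0 := by
  unfold pvTW
  rw [List.takeWhile_cons, if_neg (by simpa using hv)]
  rfl

theorem pvInnerA_spec (a : List Int) : ∀ (fuel : Nat) (y : Int), 0 ≤ y → y < (a.length : Int) →
    pvTW (a.drop y.toNat) + 1 ≤ fuel →
    pvInnerA a (a.length : Int) y fuel = y + (pvTW (a.drop y.toNat) : Int) := by
  intro fuel
  induction fuel with
  | zero => intro y _ _ hf; omega
  | succ f ih =>
    intro y hy0 hyl hf
    have hyn : y.toNat < a.length := by omega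
    have hget : (PySem.List.pyGet? a y).getD 0 = a[y.toNat] := by
      rw [PySem.List.pyGet?_eq_some_getElem a hy0 hyl]; rfl
    have hdrop : a.drop y.toNat = a[y.toNat] :: a.drop (y.toNat + 1) :=
      List.drop_eq_getElem_cons hyn
    by_cases hv : a[y.toNat] ≤ 0
    · have ht : pvTW (a.drop y.toNat) = pvTW (a.drop (y.toNat + 1)) + 1 := by
        rw [hdrop]; exact pvTW_cons_le _ hv
      have hy1 : (y + 1).toNat = y.toNat + 1 := by omega
      simp only [pvInnerA, hget, if_pos hv]
      by_cases hend : (a.length : Int) = y + 1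
      · have hnil : a.drop (y.toNat + 1) = [] := by
          apply List.drop_eq_nil_of_le; omega
        rw [hnil] at ht
        simp only [beq_iff_eq, if_pos hend, ht]
        simp [pvTW]
      · have hlt : y + 1 < (a.length : Int) := by omega
        have hrec := ih (y + 1) (by omega) hlt (by rw [hy1]; omega)
        simp only [beq_iff_eq, if_neg hend, hrec, hy1, ht]
        push_cast; ring
    · have ht : pvTW (a.drop y.toNat) = 0 := by
        rw [hdrop]; exact pvTW_cons_pos _ hv
      simp only [pvInnerA, hget, if_neg hv, ht]
      simp

theorem pvOuterA_spec (a : List Int) : ∀ (fuel : Nat) (x y : Int), 0 ≤ y →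
    (a.length : Int) - y < (fuel : Int) →
    pvOuterA a (a.length : Int) x y fuel = x + pvCnt (a.drop y.toNat) false := by
  intro fuel
  induction fuel with
  | zero =>
    intro x y hy0 hf
    have hnil : a.drop y.toNat = [] := by
      apply List.drop_eq_nil_of_le; omega
    simp [pvOuterA, hnil, pvCnt]
  | succ f ih =>
    intro x y hy0 hf
    by_cases hyl : y < (a.length : Int)
    · have hyn : y.toNat < a.length := by omega
      have hget : (PySem.List.pyGet? a y).getD 0 = a[y.toNat] := by
        rw [PySem.List.pyGet?_eq_some_getElem a hy0 hyl]; rfl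
      have hdrop : a.drop y.toNat = a[y.toNat] :: a.drop (y.toNat + 1) :=
        List.drop_eq_getElem_cons hyn
      simp only [pvOuterA, if_pos hyl, hget]
      by_cases hv : a[y.toNat] < 0
      · rw [if_pos hv]
        set t := pvTW (a.drop y.toNat) with htdef
        have ht' : t = pvTW (a.drop (y.toNat + 1)) + 1 := by
          rw [htdef, hdrop]; exact pvTW_cons_le _ (by omega)
        have ht1 : 1 ≤ t := by omega
        have htle : t ≤ a.length - y.toNat := by
          have h1 : t ≤ (a.drop y.toNat).length :=
            (List.takeWhile_sublist _).length_le
          simpa [List.length_drop] using h1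
        have hfuel : t + 1 ≤ ((a.length : Int) - y).toNat + 1 := by omega
        have hinner := pvInnerA_spec a (((a.length : Int) - y).toNat + 1) y hy0 hyl hfuel
        rw [hinner]
        have hrec := ih (x + 1) (y + (t : Int) + 1) (by omega) (by omega)
        rw [hrec]
        have hnt : (y + (t : Int) + 1).toNat = y.toNat + t + 1 := by omega
        rw [hnt]
        have hdd : (a.drop (y.toNat + 1)).drop (pvTW (a.drop (y.toNat + 1)) + 1) = a.drop (y.toNat + t + 1) := by
          rw [List.drop_drop]
          congr 1
          omega
        have hcnt : pvCnt (a.drop y.toNat) false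
            = 1 + pvCnt ((a.drop (y.toNat + 1)).drop (pvTW (a.drop (y.toNat + 1)) + 1)) false := by
          rw [hdrop]
          simp only [pvCnt, if_neg (show ¬ a[y.toNat] > 0 by omega), if_pos hv,
            if_neg Bool.false_ne_true]
          rw [pvCnt_true_drop (a.drop (y.toNat + 1))]
        rw [hcnt, ← hdd]; ring
      · rw [if_neg hv]
        have hrec := ih x (y + 1) (by omega) (by omega)
        rw [hrec]
        have hnt : (y + 1).toNat = y.toNat + 1 := by omega
        rw [hnt]
        have hcnt : pvCnt (a.drop y.toNat) false = pvCnt (a.drop (y.toNat + 1)) false := by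
          rw [hdrop]
          by_cases hp : a[y.toNat] > 0
          · simp only [pvCnt, if_pos hp]
          · simp only [pvCnt, if_neg hp, if_neg hv]
        rw [hcnt]
    · have hnil : a.drop y.toNat = [] := by
        apply List.drop_eq_nil_of_le; omega
      simp only [pvOuterA]
      rw [if_neg hyl, hnil]
      simp [pvCnt]

-- ===== VERDICT (by name: the statement is the Claim_ definition above) =====
theorem get_min_number_of_operations_spec : Claim_equal_get_min_number_of_operations := by
  intro a _
  unfold Spec_get_min_number_of_operations get_min_number_of_operations get_min_number_of_operations_alt
  rw [pvOuterA_spec a (a.length + 1) 0 0 (by omega) (by push_cast; omega)]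
  rw [pvFoldl_count, (pvGroups_cnt a).1]
  simp
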